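-- pv_equiv track=rewrite | github.com/pixo2000/Informatik | Xando/module/tkinterkalender.py | kalender
-- ===== SOURCE A (Python) =====
-- def ist_schaltjahr(jahr):
--     return jahr % 4 == 0 and (jahr % 100 != 0 or jahr % 400 == 0)
--
-- def tage_im_monat(monat, jahr):
--     if monat == 2:
--         return 29 if ist_schaltjahr(jahr) else 28
--     elif monat in [4, 6, 9, 11]:
--         return 30
--     else:
--         return 31
--
-- def erster_wochentag_im_monat(monat, jahr):
--     if monat < 3:
--         monat += 12
--         jahr -= 1
--     k = jahr % 100
--     j = jahr // 100
--     f = 1 + (13 * (monat + 1)) // 5 + k + k // 4 + j // 4 + 5 * j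
--     return (f % 7 + 5) % 7
--
-- def kalender(monat, jahr):
--     monthdays = tage_im_monat(monat, jahr)
--     start_day = erster_wochentag_im_monat(monat, jahr)
--
--     result = f"{monat}/{jahr}\n"
--     result += "Mo Di Mi Do Fr Sa So\n"
--
--     result += "   " * start_day
--
--     day = 1
--     current_day = start_day
--     while day <= monthdays:
--         result += f"{day:2} "
--         day += 1
--         current_day += 1
--         if current_day == 7:
--             result += "\n"
--             current_day = 0
--
--     return result
-- ===== SOURCE B (Python) =====
-- def ist_schaltjahr(jahr):
--     return jahr % 4 == 0 and (jahr % 100 != 0 or jahr % 400 == 0)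
--
-- def tage_im_monat(monat, jahr):
--     if monat == 2:
--         return 29 if ist_schaltjahr(jahr) else 28
--     elif monat in [4, 6, 9, 11]:
--         return 30
--     else:
--         return 31
--
-- def erster_wochentag_im_monat(monat, jahr):
--     if monat < 3:
--         monat += 12
--         jahr -= 1
--     k = jahr % 100
--     j = jahr // 100
--     f = 1 + (13 * (monat + 1)) // 5 + k + k // 4 + j // 4 + 5 * j
--     return (f % 7 + 5) % 7
--
-- def kalender(monat, jahr):
--     monthdays = tage_im_monat(monat, jahr)
--     start_day = erster_wochentag_im_monat(monat, jahr)
--     cells = ["   "] * start_day + [f"{d:2} " for d in range(1, monthdays + 1)]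
--     rows = []
--     for i in range(0, len(cells), 7):
--         group = cells[i:i + 7]
--         rows.append("".join(group) + ("\n" if len(group) == 7 else ""))
--     return f"{monat}/{jahr}\n" + "Mo Di Mi Do Fr Sa So\n" + "".join(rows)
-- ===== Notes on version B (the rewrite author's own statement) =====
-- stated objective: alternative
-- what changed: A emits cells through a stateful while loop tracking day and current_day and inserting a newline whenever the column counter hits 7; B first materialises the whole grid as one flat list of 3-character cells (leading blanks plus formatted days) and then joins it in chunks of 7, appending a newline only after full chunks.
import Mathlib
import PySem

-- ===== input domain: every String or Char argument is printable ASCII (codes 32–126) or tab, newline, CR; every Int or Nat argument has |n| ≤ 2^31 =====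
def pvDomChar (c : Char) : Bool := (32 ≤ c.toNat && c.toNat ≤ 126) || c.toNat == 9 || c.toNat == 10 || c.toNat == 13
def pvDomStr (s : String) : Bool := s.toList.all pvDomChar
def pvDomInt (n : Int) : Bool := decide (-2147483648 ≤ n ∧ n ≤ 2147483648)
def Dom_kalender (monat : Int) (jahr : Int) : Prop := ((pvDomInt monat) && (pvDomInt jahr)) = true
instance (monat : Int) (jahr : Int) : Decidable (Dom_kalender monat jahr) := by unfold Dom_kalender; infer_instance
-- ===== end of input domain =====

-- B builds the grid as one flat list of 3-character cells and joins it in chunks of 7,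
-- instead of A's stateful day/current_day while loop; objective: alternative decomposition (same cost).

-- shared helpers (the three helper functions are identical in Source A and Source B)
def istSchaltjahr (jahr : Int) : Bool :=
  PySem.Int.mod jahr 4 == 0 && (PySem.Int.mod jahr 100 != 0 || PySem.Int.mod jahr 400 == 0)

def tageImMonat (monat jahr : Int) : Int :=
  if monat == 2 then (if istSchaltjahr jahr then 29 else 28)
  else if ([4, 6, 9, 11] : List Int).contains monat then 30
  else 31

def ersterWochentag (monat jahr : Int) : Int :=
  let monat' := if monat < 3 then monat + 12 else monat
  let jahr' := if monat < 3 then jahr - 1 else jahr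
  let k := PySem.Int.mod jahr' 100
  let j := PySem.Int.floordiv jahr' 100
  let f := 1 + PySem.Int.floordiv (13 * (monat' + 1)) 5 + k + PySem.Int.floordiv k 4
             + PySem.Int.floordiv j 4 + 5 * j
  PySem.Int.mod (PySem.Int.mod f 7 + 5) 7

-- f"{d:2} ": str(d) right-aligned to width 2 (exact for width-2 format of an int), then a space
def fmt2 (d : Int) : String :=
  let s := PySem.Int.toStr d
  (if PySem.Str.len s < 2 then " " ++ s else s) ++ " "

-- ===== PORT A =====
-- "   " * n  (Python string repetition)
def repSp (n : Int) : String :=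
  if _h : n ≤ 0 then "" else repSp (n - 1) ++ "   "
termination_by n.toNat
decreasing_by omega

-- the while loop: state (day, current_day, result-so-far)
def kalenderLoop (monthdays day current : Int) (acc : String) : String :=
  if h : day ≤ monthdays then
    let acc' := acc ++ fmt2 day
    if current + 1 == 7 then kalenderLoop monthdays (day + 1) 0 (acc' ++ "\n")
    else kalenderLoop monthdays (day + 1) (current + 1) acc'
  else acc
termination_by (monthdays + 1 - day).toNat
decreasing_by all_goals omega

def kalender (monat : Int) (jahr : Int) : String :=
  let monthdays := tageImMonat monat jahr
  let start := ersterWochentag monat jahr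
  PySem.Int.toStr monat ++ "/" ++ PySem.Int.toStr jahr ++ "\n"
    ++ "Mo Di Mi Do Fr Sa So\n"
    ++ repSp start
    ++ kalenderLoop monthdays 1 start ""

-- ===== PORT B =====
-- for i in range(0, len(cells), 7): emit "".join(cells[i:i+7]) plus "\n" iff the group is full
def rowsB (cells : List String) : String :=
  if _h : cells = [] then ""
  else
    let g := cells.take 7
    (PySem.Str.join "" g ++ (if g.length == 7 then "\n" else "")) ++ rowsB (cells.drop 7)
termination_by cells.length
decreasing_by have := List.length_pos_iff.mpr _h; simp [List.length_drop]; omega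

def kalender_alt (monat : Int) (jahr : Int) : String :=
  let monthdays := tageImMonat monat jahr
  let start := ersterWochentag monat jahr
  let cells := PySem.List.pyRepeat ["   "] start
                 ++ (PySem.List.pyRange 1 (monthdays + 1) 1).map fmt2
  PySem.Int.toStr monat ++ "/" ++ PySem.Int.toStr jahr ++ "\n"
    ++ "Mo Di Mi Do Fr Sa So\n"
    ++ rowsB cells

-- ===== PRECONDITION & SPEC =====
def Spec_kalender (monat : Int) (jahr : Int) (out : String) : Prop := out = kalender_alt monat jahr
instance (monat : Int) (jahr : Int) (out : String) : Decidable (Spec_kalender monat jahr out) := by unfold Spec_kalender; infer_instance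

-- ===== CLAIM (what is proved, stated in full; the proofs are below) =====
def Claim_equal_kalender : Prop := ∀ (monat : Int) (jahr : Int), Dom_kalender monat jahr → Spec_kalender monat jahr (kalender monat jahr)

-- ===== LEMMAS AND PROOFS =====

-- abstract row renderer both sides are reduced to
def renderR (current : Nat) : List String → String
  | [] => ""
  | c :: rest => if current + 1 = 7 then c ++ "\n" ++ renderR 0 rest
                 else c ++ renderR (current + 1) rest

theorem join_empty_cons (c : String) (rest : List String) :
    PySem.Str.join "" (c :: rest) = c ++ PySem.Str.join "" rest := by
  apply String.ext
  simp [PySem.Str.join, PySem.Chars.join, List.intercalate]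
  cases rest <;> simp

theorem join_empty_nil : PySem.Str.join "" ([] : List String) = "" := by
  rfl

theorem pyRange_one_nil (a b : Int) (h : b ≤ a) : PySem.List.pyRange a b 1 = [] := by
  simp [PySem.List.pyRange]; omega

theorem loop_eq_aux (n : Nat) : ∀ (monthdays day current : Int) (acc : String),
    (monthdays + 1 - day).toNat = n → 0 ≤ current → current < 7 →
    kalenderLoop monthdays day current acc
      = acc ++ renderR current.toNat ((PySem.List.pyRange day (monthdays + 1) 1).map fmt2) := by
  induction n with
  | zero =>
    intro md day cur acc hn h0 h7
    rw [kalenderLoop]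
    simp only [show ¬ day ≤ md by omega, dite_false]
    rw [pyRange_one_nil _ _ (by omega)]
    simp [renderR]
  | succ n ih =>
    intro md day cur acc hn h0 h7
    rw [kalenderLoop]
    simp only [show day ≤ md from by omega, dite_true]
    rw [PySem.List.pyRange_one_cons (by omega : day < md + 1)]
    simp only [List.map_cons, renderR]
    by_cases hcur : cur + 1 = 7
    · have : (cur + 1 == 7) = true := by simp [hcur]
      rw [this]
      simp only [if_pos (show cur.toNat + 1 = 7 by omega)]
      rw [ih md (day + 1) 0 _ (by omega) (by omega) (by omega)]
      simp [String.append_assoc]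
    · have : (cur + 1 == 7) = false := by simp; omega
      rw [this]
      simp only [if_neg (show ¬ cur.toNat + 1 = 7 by omega)]
      rw [ih md (day + 1) (cur + 1) _ (by omega) (by omega) (by omega)]
      have : (cur + 1).toNat = cur.toNat + 1 := by omega
      simp [String.append_assoc, this]

theorem loop_eq (monthdays day current : Int) (hc0 : 0 ≤ current) (hc : current < 7)
    (acc : String) :
    kalenderLoop monthdays day current acc
      = acc ++ renderR current.toNat ((PySem.List.pyRange day (monthdays + 1) 1).map fmt2) :=
  loop_eq_aux _ monthdays day current acc rfl hc0 hc

theorem repSp_eq (k : Nat) : repSp (k : Int) = String.ofList (List.replicate (3 * k) ' ') := by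
  induction k with
  | zero => rw [repSp]; simp
  | succ k ih =>
    rw [repSp, dif_neg (by push_cast; omega : ¬ ((k + 1 : Nat) : Int) ≤ 0)]
    rw [show ((k + 1 : Nat) : Int) - 1 = (k : Int) by push_cast; ring, ih]
    apply String.ext; simp [List.replicate_add, Nat.mul_add]

theorem render_rep (k current : Nat) (h : current + k < 7) (rest : List String) :
    renderR current (List.replicate k "   " ++ rest)
      = repSp (k : Int) ++ renderR (current + k) rest := by
  induction k generalizing current with
  | zero => rw [repSp_eq]; simp
  | succ k ih =>
    rw [List.replicate_succ, List.cons_append, renderR]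
    rw [if_neg (by omega)]
    rw [ih (current + 1) (by omega)]
    rw [repSp_eq, repSp_eq]
    rw [show current + 1 + k = current + (k + 1) by omega, ← String.append_assoc]
    congr 1
    apply String.ext; simp; rw [show 3 * (k + 1) = 3 + 3 * k by ring, List.replicate_add]; rfl

theorem render_split (k : Nat) (cells : List String) (h : k < 7) :
    renderR k cells
      = PySem.Str.join "" (cells.take (7 - k))
        ++ (if 7 - k ≤ cells.length then "\n" ++ renderR 0 (cells.drop (7 - k)) else "") := by
  induction cells generalizing k with
  | nil =>
    simp [renderR, join_empty_nil, show ¬ 7 - k ≤ 0 by omega]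
  | cons c rest ih =>
    rw [renderR]
    by_cases hk : k + 1 = 7
    · rw [if_pos hk]
      have h1 : 7 - k = 1 := by omega
      simp [h1, join_empty_cons, join_empty_nil, String.append_assoc]
    · rw [if_neg hk, ih (k + 1) (by omega)]
      have h2 : 7 - k = (7 - (k + 1)) + 1 := by omega
      rw [h2]
      simp only [List.take_succ_cons, List.drop_succ_cons, List.length_cons, join_empty_cons]
      rw [String.append_assoc]
      congr 1
      congr 1
      simp only [Nat.add_le_add_iff_right]

theorem rowsB_eq_render_aux (n : Nat) : ∀ (cells : List String), cells.length = n →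
    rowsB cells = renderR 0 cells := by
  induction n using Nat.strong_induction_on with
  | _ n ih =>
    intro cells hn
    rw [rowsB]
    by_cases hnil : cells = []
    · simp [hnil, renderR]
    · rw [dif_neg hnil]
      rw [render_split 0 cells (by omega)]
      simp only [Nat.sub_zero]
      by_cases hlen : 7 ≤ cells.length
      · have h7 : (cells.take 7).length = 7 := by simp [hlen]
        rw [ih (cells.drop 7).length (by simp; omega) _ rfl]
        simp [h7, String.append_assoc, hlen]
      · have h7 : (cells.take 7).length ≠ 7 := by simp; omega
        have hdrop : cells.drop 7 = [] := by
          apply List.drop_eq_nil_of_le; omega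
        simp [hdrop, hlen, rowsB]

theorem rowsB_eq_render (cells : List String) : rowsB cells = renderR 0 cells :=
  rowsB_eq_render_aux _ cells rfl

theorem start_bounds (monat jahr : Int) :
    0 ≤ ersterWochentag monat jahr ∧ ersterWochentag monat jahr < 7 := by
  unfold ersterWochentag
  exact ⟨PySem.Int.mod_nonneg _ (by norm_num), PySem.Int.mod_lt _ (by norm_num)⟩

-- ===== VERDICT (by name: the statement is the Claim_ definition above) =====
theorem kalender_spec : Claim_equal_kalender := by
  intro monat jahr _
  unfold Spec_kalender kalender kalender_alt
  dsimp only
  obtain ⟨h0, h7⟩ := start_bounds monat jahr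
  rw [loop_eq _ _ _ h0 h7, rowsB_eq_render, PySem.List.pyRepeat_singleton]
  rw [render_rep (ersterWochentag monat jahr).toNat 0 (by omega)]
  simp [String.append_assoc, String.empty_append]
  congr 2
  omega
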